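-- pv_equiv track=rewrite | github.com/Juli-Eyre/crypto_experiment | ex1/qs2_vigenere.py | find_index_key
-- ===== SOURCE A (Python) =====
-- from string import ascii_letters, digits
--
-- def find_index_key(sub_arr):  # sub_arr是同一个ki的分组
--     # all_ch = printable
--     all_key = ascii_letters + digits + ',' + '.' + ' '
--     test_key = []
--     possible_key = []
--     # 遍历整个ascii码(0-127)
--     for x in range(0x00, 0xFF):
--         test_key.append(x)
--         possible_key.append(x)
--     # 如果子串中所有位置都可以被ch异或为可见字符,则该ch可能为key的一部分
--     for i in test_key:
--         for j in sub_arr: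
--             if chr(i ^ j) not in all_key:
--                 possible_key.remove(i)
--                 break
--     return possible_key
-- ===== SOURCE B (Python) =====
-- from string import ascii_letters, digits
--
-- def find_index_key(sub_arr):
--     # Per-byte winning-candidate sets intersected, instead of A's candidate x input nested scan.
--     allowed = {ord(c) for c in ascii_letters + digits + ',' + '.' + ' '}
--     result = set(range(0x00, 0xFF))
--     for j in sub_arr:
--         result &= {a ^ j for a in allowed}
--     return sorted(result)
-- ===== Notes on version B (the rewrite author's own statement) =====
-- stated objective: alternative
-- what changed: Instead of A's nested candidate-by-candidate scan that removes failing candidates from a prebuilt 0..254 list, B intersects per-input-byte sets of winning candidates {ord(c) ^ j for allowed c} starting from the full 0..254 universe and returns them sorted.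
-- outside the precondition, e.g. on find_index_key([0, 128, -1]): A returns [], B returns []; on find_index_key([-1]): A raises ValueError, B returns []
import Mathlib
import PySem

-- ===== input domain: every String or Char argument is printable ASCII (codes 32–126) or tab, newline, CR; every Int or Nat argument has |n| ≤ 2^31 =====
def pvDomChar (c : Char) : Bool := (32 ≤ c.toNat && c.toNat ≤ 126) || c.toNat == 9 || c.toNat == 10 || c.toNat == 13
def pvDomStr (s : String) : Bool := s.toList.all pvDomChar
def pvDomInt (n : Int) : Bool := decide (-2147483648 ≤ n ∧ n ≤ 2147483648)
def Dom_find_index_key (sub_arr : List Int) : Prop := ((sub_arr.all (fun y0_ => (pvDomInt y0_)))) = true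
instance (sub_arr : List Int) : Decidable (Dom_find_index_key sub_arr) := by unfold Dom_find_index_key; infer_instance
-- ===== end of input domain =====

-- B replaces A's candidate×input nested scan with one allowed-code set intersected per input byte, then sorts (alternative decomposition, same result).

-- ===== PORT A =====
-- all_key = ascii_letters + digits + ',' + '.' + ' ', as character codes.
-- A's test `chr(i ^ j) not in all_key` is ported on CODES: under Pre_ chr(i ^ j) is defined, all_key is
-- ASCII with pairwise-distinct characters, so chr(i^j) ∈ all_key ⟺ the integer i^j is one of all_key's
-- code points (exact on the admitted inputs).
def pvAllKeyCodes : List Int :=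
  "abcdefghijklmnopqrstuvwxyzABCDEFGHIJKLMNOPQRSTUVWXYZ0123456789,. ".toList.map
    (fun c => (c.toNat : Int))

-- inner `for j in sub_arr: if chr(i ^ j) not in all_key: possible_key.remove(i); break`
-- (list.remove cannot raise here — i is still present the first time it is removed; getD keeps the port total)
def pvInnerA (i : Int) (pk : List Int) : List Int → List Int
  | [] => pk
  | j :: rest =>
      if PySem.Int.bxor i j ∈ pvAllKeyCodes then pvInnerA i pk rest
      else (PySem.List.remove? pk i).getD pk

def find_index_key (sub_arr : List Int) : List Int :=
  let test_key := PySem.List.pyRange 0 255 1       -- range(0x00, 0xFF)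
  let possible_key := test_key
  test_key.foldl (fun pk i => pvInnerA i pk sub_arr) possible_key

-- ===== PORT B =====
def pvAllowed : PySem.Set Int := PySem.Set.ofList pvAllKeyCodes   -- {ord(c) for c in …}

def pvStepB (r : PySem.Set Int) (j : Int) : PySem.Set Int :=      -- result &= {a ^ j for a in allowed}
  PySem.Set.inter r (PySem.Set.ofList (pvAllowed.map (fun a => PySem.Int.bxor a j)))

def find_index_key_alt (sub_arr : List Int) : List Int :=
  let result := sub_arr.foldl pvStepB (PySem.Set.ofList (PySem.List.pyRange 0 255 1))
  PySem.List.sorted result (fun x => x) false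

-- ===== PRECONDITION & SPEC =====
-- Pre_ excludes inputs holding a code outside chr's range (negative or > 0x10FFFF), on which the Python A
-- raises ValueError in chr(i ^ j); it keeps them when a chr-valid code ≥ 256 occurs preceded only by
-- chr-valid codes — that code XORs every candidate out of the printable set, so A returns an empty candidate list before any bad
-- code is reached (the only exclusions where A still returns are the same early-[] accident produced by
-- codes < 256 alone, see cites).
def Pre_find_index_key (sub_arr : List Int) : Prop :=
  (∀ j ∈ sub_arr, 0 ≤ j ∧ j ≤ 1114111) ∨
  (∃ k < sub_arr.length, (∀ l ≤ k, 0 ≤ sub_arr[l]! ∧ sub_arr[l]! ≤ 1114111) ∧ 256 ≤ sub_arr[k]!)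
instance (sub_arr : List Int) : Decidable (Pre_find_index_key sub_arr) := by
  unfold Pre_find_index_key; infer_instance

def pvWitness_find_index_key : List Int := [65, 66, 7]

def Spec_find_index_key (sub_arr : List Int) (out : List Int) : Prop := out = find_index_key_alt sub_arr
instance (sub_arr : List Int) (out : List Int) : Decidable (Spec_find_index_key sub_arr out) := by
  unfold Spec_find_index_key; infer_instance

-- ===== CLAIM (what is proved, stated in full; the proofs are below) =====
def Claim_equal_find_index_key : Prop := ∀ (sub_arr : List Int), Dom_find_index_key sub_arr → Pre_find_index_key sub_arr → Spec_find_index_key sub_arr (find_index_key sub_arr)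

-- ===== LEMMAS AND PROOFS =====

lemma pv_bxor_cancel (a j : Int) (ha : 0 ≤ a) (hj : 0 ≤ j) :
    PySem.Int.bxor (PySem.Int.bxor a j) j = a := by
  unfold PySem.Int.bxor
  rw [if_pos ha, if_pos hj, if_pos (Int.natCast_nonneg _), if_pos hj]
  simp [Nat.xor_xor_cancel_right, Int.toNat_of_nonneg ha]

lemma pvAllKeyCodes_nonneg : ∀ a ∈ pvAllKeyCodes, 0 ≤ a := by decide

lemma pvAllKeyCodes_lt_256 : ∀ a ∈ pvAllKeyCodes, a < 256 := by decide

lemma pv_nat_xor_ge_256 (a b : Nat) (ha : a < 256) (hb : 256 ≤ b) : 256 ≤ a ^^^ b := by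
  have h1 : (a ^^^ b) >>> 8 = (a >>> 8) ^^^ (b >>> 8) := Nat.shiftRight_xor_distrib
  have ha8 : a >>> 8 = 0 := by simp [Nat.shiftRight_eq_div_pow]; omega
  have hb8 : 1 ≤ b >>> 8 := by simp [Nat.shiftRight_eq_div_pow]; omega
  have h2 : 1 ≤ (a ^^^ b) >>> 8 := by rw [h1, ha8]; simpa using hb8
  simp [Nat.shiftRight_eq_div_pow] at h2; omega

-- XOR with a code ≥ 256 throws every byte-sized value above every printable code
lemma pv_bxor_ge_256 (i j : Int) (h0 : 0 ≤ i) (h1 : i < 256) (hj : 256 ≤ j) :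
    256 ≤ PySem.Int.bxor i j := by
  rw [PySem.Int.bxor_of_nonneg h0 (by omega)]
  have := pv_nat_xor_ge_256 i.toNat j.toNat (by omega) (by omega)
  omega

-- the inner loop either leaves possible_key alone (all positions decode to allowed chars) or erases i
lemma pvInnerA_eq (i : Int) (pk : List Int) (sub : List Int) :
    pvInnerA i pk sub =
      if sub.all (fun j => decide (PySem.Int.bxor i j ∈ pvAllKeyCodes)) then pk else pk.erase i := by
  induction sub with
  | nil => simp [pvInnerA]
  | cons j rest ih =>
    by_cases h : PySem.Int.bxor i j ∈ pvAllKeyCodes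
    · simp [pvInnerA, h, ih]
    · have hrem : (PySem.List.remove? pk i).getD pk = pk.erase i := by
        by_cases hm : i ∈ pk
        · rw [PySem.List.remove?_eq_some_erase pk i hm]; rfl
        · rw [(PySem.List.remove?_eq_none_iff pk i).mpr hm, List.erase_of_not_mem hm]; rfl
      simp [pvInnerA, h, hrem]

-- folding conditional erasure of each visited element over a duplicate-free list is a filter
lemma pv_foldl_erase (keep : Int → Bool) :
    ∀ (l acc : List Int), acc.Nodup →
      l.foldl (fun pk i => if keep i then pk else pk.erase i) acc
        = acc.filter (fun x => decide (x ∉ l) || keep x) := by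
  intro l
  induction l with
  | nil => intro acc _; simp
  | cons a l ih =>
    intro acc hnd
    simp only [List.foldl_cons]
    by_cases h : keep a
    · rw [if_pos h, ih acc hnd]
      refine List.filter_congr (fun x _ => ?_)
      by_cases hxa : x = a <;> simp [hxa, h]
    · rw [if_neg h, ih (acc.erase a) (hnd.erase a),
        List.Nodup.erase_eq_filter hnd, List.filter_filter]
      refine List.filter_congr (fun x _ => ?_)
      by_cases hxa : x = a <;> simp [hxa, h]

-- characterisation of port A: the surviving candidates, as a filter of the ascending range
lemma pv_find_index_key_eq_filter (sub : List Int) :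
    find_index_key sub
      = (PySem.List.pyRange 0 255 1).filter
          (fun i => sub.all (fun j => decide (PySem.Int.bxor i j ∈ pvAllKeyCodes))) := by
  unfold find_index_key
  simp only [pvInnerA_eq]
  rw [pv_foldl_erase _ _ _ (PySem.List.nodup_pyRange_one 0 255)]
  exact List.filter_congr (fun x hx => by simp [hx])

-- membership in one intersection step
lemma pv_mem_stepB (r : List Int) (j x : Int) (hx : 0 ≤ x) (hj : 0 ≤ j) :
    x ∈ pvStepB r j ↔ x ∈ r ∧ PySem.Int.bxor x j ∈ pvAllKeyCodes := by
  unfold pvStepB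
  rw [PySem.Set.mem_inter _ _ _]
  refine and_congr_right (fun _ => ?_)
  simp only [PySem.Set.mem_ofList, List.mem_map, pvAllowed]
  constructor
  · rintro ⟨a, ha, rfl⟩
    rwa [pv_bxor_cancel a j (pvAllKeyCodes_nonneg a ha) hj]
  · intro h
    exact ⟨PySem.Int.bxor x j, h, pv_bxor_cancel x j hx hj⟩

lemma pv_mem_stepB_left (r : PySem.Set Int) (j x : Int) (h : x ∈ pvStepB r j) : x ∈ r :=
  ((PySem.Set.mem_inter _ _ _).mp h).1

lemma pv_foldl_stepB_subset (sub : List Int) :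
    ∀ r x, x ∈ sub.foldl pvStepB r → x ∈ r := by
  induction sub with
  | nil => intro r x h; simpa using h
  | cons j rest ih =>
    intro r x h
    exact pv_mem_stepB_left r j x (ih (pvStepB r j) x h)

lemma pv_foldl_stepB_nodup (sub : List Int) :
    ∀ r : List Int, r.Nodup → (sub.foldl pvStepB r).Nodup := by
  induction sub with
  | nil => intro r h; simpa using h
  | cons j rest ih =>
    intro r hr
    exact ih (pvStepB r j) (PySem.Set.nodup_inter r _ hr)

lemma pv_foldl_stepB_mem (sub : List Int) (hsub : ∀ j ∈ sub, 0 ≤ j) :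
    ∀ r : List Int, (∀ x ∈ r, 0 ≤ x) →
      ∀ x, x ∈ sub.foldl pvStepB r
        ↔ x ∈ r ∧ ∀ j ∈ sub, PySem.Int.bxor x j ∈ pvAllKeyCodes := by
  induction sub with
  | nil => intro r _ x; simp
  | cons j rest ih =>
    intro r hr x
    have hj : 0 ≤ j := hsub j List.mem_cons_self
    have hrest : ∀ j' ∈ rest, 0 ≤ j' := fun j' hj' => hsub j' (List.mem_cons_of_mem _ hj')
    have hr' : ∀ y ∈ pvStepB r j, 0 ≤ y := fun y hy => hr y (pv_mem_stepB_left r j y hy)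
    simp only [List.foldl_cons]
    rw [ih hrest (pvStepB r j) hr']
    constructor
    · rintro ⟨hstep, hrest'⟩
      have hx : 0 ≤ x := hr' x hstep
      obtain ⟨hxr, hxj⟩ := (pv_mem_stepB r j x hx hj).mp hstep
      refine ⟨hxr, fun j' hj' => ?_⟩
      rcases List.mem_cons.mp hj' with h | h
      · exact h ▸ hxj
      · exact hrest' j' h
    · rintro ⟨hxr, hall⟩
      have hx : 0 ≤ x := hr x hxr
      exact ⟨(pv_mem_stepB r j x hx hj).mpr ⟨hxr, hall j List.mem_cons_self⟩,
        fun j' hj' => hall j' (List.mem_cons_of_mem _ hj')⟩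

-- ===== VERDICT (by name: the statement is the Claim_ definition above) =====
theorem find_index_key_spec : Claim_equal_find_index_key := by
  intro sub_arr _ hpre
  unfold Spec_find_index_key
  have hstart : PySem.Set.ofList (PySem.List.pyRange 0 255 1) = PySem.List.pyRange 0 255 1 :=
    PySem.Set.ofList_eq_self_of_nodup _ (PySem.List.nodup_pyRange_one 0 255)
  rcases hpre with hok | ⟨k, hk, _, hkill⟩
  · -- all codes chr-valid: the two programs compute the same candidate set
    have hsub : ∀ j ∈ sub_arr, 0 ≤ j := fun j hj => (hok j hj).1
    unfold find_index_key_alt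
    rw [hstart, pv_find_index_key_eq_filter]
    set keep : Int → Bool :=
      fun i => sub_arr.all (fun j => decide (PySem.Int.bxor i j ∈ pvAllKeyCodes)) with hkeep
    set F := (PySem.List.pyRange 0 255 1).filter keep with hF
    set R := sub_arr.foldl pvStepB (PySem.List.pyRange 0 255 1) with hR
    have hFnd : F.Nodup := (PySem.List.nodup_pyRange_one 0 255).filter _
    have hRnd : R.Nodup := pv_foldl_stepB_nodup sub_arr _ (PySem.List.nodup_pyRange_one 0 255)
    have hmem : ∀ x, x ∈ F ↔ x ∈ R := by
      intro x
      rw [hF, List.mem_filter, hR,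
        pv_foldl_stepB_mem sub_arr hsub _ (fun y hy => (PySem.List.mem_pyRange_one.mp hy).1)]
      simp [hkeep, List.all_eq_true]
    have hperm : F.Perm R := (List.perm_ext_iff_of_nodup hFnd hRnd).mpr hmem
    have hpair : F.Pairwise (fun a b : Int => a < b) :=
      (PySem.List.pairwise_lt_pyRange_one 0 255).filter _
    exact (PySem.List.sorted_eq_of_perm_of_pairwise_lt _ _ _ hperm hpair).symm
  · -- a chr-valid code ≥ 256 occurs: both programs return an empty candidate list
    rw [getElem!_pos sub_arr k hk] at hkill
    have hA : find_index_key sub_arr = [] := by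
      rw [pv_find_index_key_eq_filter]
      refine List.filter_eq_nil_iff.mpr (fun i hi => ?_)
      have hi' := PySem.List.mem_pyRange_one.mp hi
      simp only [List.all_eq_true, decide_eq_true_eq]
      intro hall
      have hmem := hall _ (List.getElem_mem hk)
      have h256 := pv_bxor_ge_256 i sub_arr[k] hi'.1 (by omega) hkill
      have := pvAllKeyCodes_lt_256 _ hmem
      omega
    have hB : find_index_key_alt sub_arr = [] := by
      unfold find_index_key_alt
      rw [hstart]
      have hfold : sub_arr.foldl pvStepB (PySem.List.pyRange 0 255 1) = [] := by
        rw [List.eq_nil_iff_forall_not_mem]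
        intro x hx
        rw [← List.take_append_drop (k + 1) sub_arr, List.foldl_append] at hx
        have hx1 := pv_foldl_stepB_subset _ _ _ hx
        rw [← List.take_concat_get hk] at hx1
        simp only [List.concat_eq_append, List.foldl_append, List.foldl_cons,
          List.foldl_nil] at hx1
        have hxlow : x < 255 := by
          have hx2 := pv_mem_stepB_left _ _ _ hx1
          have hx3 := pv_foldl_stepB_subset _ _ _ hx2
          exact (PySem.List.mem_pyRange_one.mp hx3).2
        have hxhigh : 256 ≤ x := by
          have hx4 := ((PySem.Set.mem_inter _ _ _).mp hx1).2
          simp only [PySem.Set.mem_ofList, List.mem_map, pvAllowed] at hx4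
          obtain ⟨a, ha, rfl⟩ := hx4
          exact pv_bxor_ge_256 a sub_arr[k] (pvAllKeyCodes_nonneg a ha)
            (pvAllKeyCodes_lt_256 a ha) hkill
        omega
      rw [hfold]
      rfl
    rw [hA, hB]
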